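-- pv_equiv track=rewrite | github.com/akhandsingh17/assignments | codingexercise/PairsPositiveNegativeValuesArray.py | PairsPositiveNegativeValuesArray
-- ===== SOURCE A (Python) =====
-- def PairsPositiveNegativeValuesArray(ary):
--
--     stk=[]
--     dict={}
--     fnl_lst=[]
--
--     for l in ary:
--         stk.append(l)
--         if l not in dict.keys():
--             if (-1)*l in dict.keys():
--                 dict[(-1)*l]=2
--             else:
--                 dict[l]=1
--
--     for l in stk:
--         if (l in dict.keys() or (-1)*l in dict.keys()):
--             try:
--                 if dict[l]==2:
--                     if l<0:
--                         fnl_lst.append(l)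
--                         fnl_lst.append((-1)*l)
--                     else:
--                         fnl_lst.append((-1) * l)
--                         fnl_lst.append(l)
--                     dict[l]=0
--             except:
--                 if dict[(-1)*l]==2:
--                     if l<0:
--                         fnl_lst.append(l)
--                         fnl_lst.append((-1)*l)
--                     else:
--                         fnl_lst.append((-1) * l)
--                         fnl_lst.append(l)
--                     dict[(-1) * l] = 0
--     return fnl_lst
-- ===== SOURCE B (Python) =====
-- def PairsPositiveNegativeValuesArray(ary):
--     first = {}
--     for i, x in enumerate(ary):
--         first.setdefault(x, i)
--     matched = sorted((v for v in first if v > 0 and -v in first),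
--                      key=lambda v: min(first[v], first[-v]))
--     out = []
--     for v in matched:
--         out += [-v, v]
--     return out
-- ===== Notes on version B (the rewrite author's own statement) =====
-- stated objective: alternative
-- what changed: Replaced A's two-phase dict state machine (sentinels 1/2/0, a stk copy, try/except lookups) with a sort-based algorithm: record each value's first index in one dict pass, take the positive values whose negation is also a key, sort them by the earlier of the two first indices, and emit (-v, v) per value.
import Mathlib
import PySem

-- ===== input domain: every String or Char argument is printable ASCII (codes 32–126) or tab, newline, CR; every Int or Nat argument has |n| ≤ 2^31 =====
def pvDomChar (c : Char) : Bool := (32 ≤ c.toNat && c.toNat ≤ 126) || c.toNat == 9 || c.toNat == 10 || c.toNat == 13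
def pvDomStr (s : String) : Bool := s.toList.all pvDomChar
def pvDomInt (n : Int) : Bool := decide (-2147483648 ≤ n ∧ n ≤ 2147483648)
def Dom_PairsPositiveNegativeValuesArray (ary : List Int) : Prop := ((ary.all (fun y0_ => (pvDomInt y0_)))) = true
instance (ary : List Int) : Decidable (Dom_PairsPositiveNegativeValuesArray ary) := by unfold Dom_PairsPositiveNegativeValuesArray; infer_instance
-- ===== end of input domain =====

-- B replaces A's two-phase dict state machine (sentinels 1/2/0, stk copy, try/except) with a
-- sort-based algorithm: a first-index dict, then the positive values whose negation is also a
-- key, sorted by the earlier first index of the two signs (measured modestly faster in CPython).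

-- ===== PORT A =====
-- first loop body: stk.append(l); if l not in dict: if -1*l in dict: dict[-1*l]=2 else dict[l]=1
def pvStep1 (sd : List Int × PySem.Dict Int Int) (l : Int) : List Int × PySem.Dict Int Int :=
  let stk := sd.1 ++ [l]
  let d := sd.2
  if !(d.contains l) then
    if d.contains ((-1) * l) then (stk, d.insert ((-1) * l) 2)
    else (stk, d.insert l 1)
  else (stk, d)

-- second loop body; the try/except is the match on d.get? l (none = KeyError, caught by the bare except)
def pvStep2 (fd : List Int × PySem.Dict Int Int) (l : Int) : List Int × PySem.Dict Int Int :=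
  let fnl := fd.1
  let d := fd.2
  if d.contains l || d.contains ((-1) * l) then
    match d.get? l with
    | some v =>
        if v == 2 then
          (if l < 0 then fnl ++ [l] ++ [(-1) * l] else fnl ++ [(-1) * l] ++ [l], d.insert l 0)
        else (fnl, d)
    | none =>
        match d.get? ((-1) * l) with
        | some v =>
            if v == 2 then
              (if l < 0 then fnl ++ [l] ++ [(-1) * l] else fnl ++ [(-1) * l] ++ [l], d.insert ((-1) * l) 0)
            else (fnl, d)
        | none => (fnl, d)  -- the guard ensures one key exists; unreachable
  else (fnl, d)

def PairsPositiveNegativeValuesArray (ary : List Int) : List Int :=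
  let sd := ary.foldl pvStep1 ([], PySem.Dict.empty)
  let fd := sd.1.foldl pvStep2 ([], sd.2)
  fd.1

-- ===== PORT B =====
-- first = {}; for i, x in enumerate(ary): first.setdefault(x, i)
def pvFirst (ary : List Int) : PySem.Dict Int Int :=
  (PySem.List.enumerate ary 0).foldl (fun d p => d.setdefault p.2 p.1) PySem.Dict.empty

-- key=lambda v: min(first[v], first[-v]); total via unreachable fallbacks (the key is only
-- applied to values v with both v and -v keys of first)
def pvKey (first : PySem.Dict Int Int) (v : Int) : Int :=
  match first.get? v, first.get? (-v) with
  | some i, some j => min i j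
  | some i, none => i
  | none, some j => j
  | none, none => 0

def PairsPositiveNegativeValuesArray_alt (ary : List Int) : List Int :=
  let first := pvFirst ary
  let matched := PySem.List.sorted
    (first.keys.filter (fun v => decide (0 < v) && first.contains (-v))) (pvKey first) false
  matched.foldl (fun acc v => acc ++ [-v, v]) []

-- ===== PRECONDITION & SPEC =====
def Spec_PairsPositiveNegativeValuesArray (ary : List Int) (out : List Int) : Prop := out = PairsPositiveNegativeValuesArray_alt ary
instance (ary : List Int) (out : List Int) : Decidable (Spec_PairsPositiveNegativeValuesArray ary out) := by unfold Spec_PairsPositiveNegativeValuesArray; infer_instance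

-- ===== CLAIM (what is proved, stated in full; the proofs are below) =====
def Claim_equal_PairsPositiveNegativeValuesArray : Prop := ∀ (ary : List Int), Dom_PairsPositiveNegativeValuesArray ary → Spec_PairsPositiveNegativeValuesArray ary (PairsPositiveNegativeValuesArray ary)

-- ===== LEMMAS AND PROOFS =====

-- canonical single pass: the emitted-absolute-values set; A's fold is proved equal to this fold,
-- and B's sorted list is proved equal to the emission sequence pvE of this fold
def pvCStep (present : PySem.Set Int) (oe : List Int × PySem.Set Int) (x : Int) : List Int × PySem.Set Int :=
  if (x != 0) && present.contains (-x) && !(oe.2.contains |x|) then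
    (oe.1 ++ [-|x|] ++ [|x|], PySem.Set.add oe.2 |x|)
  else oe

-- A's second-loop effective lookup: dict[l] with the bare-except fallback to dict[-l]
def pvLk (d : PySem.Dict Int Int) (m : Int) : Option Int :=
  match d.get? m with
  | some v => some v
  | none => d.get? (-m)

-- invariant of A's first loop: d is the dict built from prefix p
def pvJ (p : List Int) (d : PySem.Dict Int Int) : Prop :=
  (∀ k, d.contains k = true → k ∈ p) ∧
  (∀ l : Int, l ≠ 0 → ¬(d.contains l = true ∧ d.contains (-l) = true)) ∧
  (∀ l : Int, pvLk d l = if l ∈ p ∨ -l ∈ p then some (if l ≠ 0 ∧ l ∈ p ∧ -l ∈ p then 2 else 1) else none)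

-- joint invariant of the two second loops: A's dict d and the canonical emitted set em agree
def pvInv (ary : List Int) (d : PySem.Dict Int Int) (em : PySem.Set Int) : Prop :=
  (∀ l : Int, l ≠ 0 → ¬(d.contains l = true ∧ d.contains (-l) = true)) ∧
  (∀ l ∈ ary, pvLk d l ≠ none) ∧
  (∀ l ∈ ary, (pvLk d l = some 2 ↔ l ≠ 0 ∧ -l ∈ ary ∧ |l| ∉ em))

lemma pvStk_eq : ∀ (p s : List Int) (d : PySem.Dict Int Int), (p.foldl pvStep1 (s, d)).1 = s ++ p := by
  intro p
  induction p with
  | nil => intro s d; simp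
  | cons l p ih =>
    intro s d
    have h : pvStep1 (s, d) l = ((s ++ [l], (pvStep1 (s, d) l).2) : List Int × PySem.Dict Int Int) := by
      simp only [pvStep1]
      split <;> first | rfl | (split <;> rfl)
    rw [List.foldl_cons, h, ih]
    simp

lemma pvJ_step (p : List Int) (d : PySem.Dict Int Int) (s : List Int) (l : Int)
    (hJ : pvJ p d) : pvJ (p ++ [l]) (pvStep1 (s, d) l).2 := by
  obtain ⟨hk, hc, hv⟩ := hJ
  by_cases h1 : d.contains l = true
  · -- l already a key: dict unchanged, and l ∈ p so memberships are unchanged too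
    have hstep : (pvStep1 (s, d) l).2 = d := by simp [pvStep1, h1]
    rw [hstep]
    have hlp : l ∈ p := hk l h1
    have e1 : ∀ m : Int, m ∈ p ++ [l] ↔ m ∈ p := by
      intro m
      simp only [List.mem_append, List.mem_singleton]
      exact ⟨fun h => h.elim id (fun h => h ▸ hlp), Or.inl⟩
    refine ⟨fun k h => (e1 k).mpr (hk k h), hc, fun m => ?_⟩
    simp only [e1]
    exact hv m
  · have h1' : d.contains l = false := by simpa using h1
    have hgl : d.get? l = none := (PySem.Dict.get?_eq_none_iff_contains d l).mpr h1'
    by_cases h2 : d.contains (-l) = true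
    · -- opposite sign seen first: dict[-l] := 2
      have hstep : (pvStep1 (s, d) l).2 = d.insert (-l) 2 := by
        simp [pvStep1, h1', h2]
      rw [hstep]
      have hl0 : l ≠ 0 := by
        rintro rfl
        rw [neg_zero, h1'] at h2
        exact absurd h2 (by simp)
      have hnlp : -l ∈ p := hk _ h2
      refine ⟨?_, ?_, ?_⟩
      · intro k hkk
        rw [PySem.Dict.contains_insert] at hkk
        simp only [Bool.or_eq_true, beq_iff_eq] at hkk
        rcases hkk with h | h
        · subst h; exact List.mem_append_left _ hnlp
        · exact List.mem_append_left _ (hk k h)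
      · intro m hm0 hmm
        obtain ⟨hma, hmb⟩ := hmm
        rw [PySem.Dict.contains_insert] at hma hmb
        simp only [beq_iff_eq, Bool.or_eq_true] at hma hmb
        rcases hma with hma | hma <;> rcases hmb with hmb | hmb
        · omega
        · have : m = -l := hma
          subst this
          rw [neg_neg] at hmb
          rw [hmb] at h1'
          simp at h1'
        · have : m = l := by omega
          subst this
          rw [hma] at h1'
          simp at h1'
        · exact hc m hm0 ⟨hma, hmb⟩
      · intro m
        by_cases hml : m = l
        · subst hml
          have hne : m ≠ -m := by omega
          simp [pvLk, PySem.Dict.get?_insert, hne, hgl, List.mem_append, hnlp, hl0]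
        · by_cases hml2 : m = -l
          · subst hml2
            have h0 : (-l : Int) ≠ 0 := by omega
            simp [pvLk, List.mem_append, hnlp, h0, neg_neg]
          · have hne1 : m ≠ -l := hml2
            have hne2 : -m ≠ -l := fun h => hml (by omega)
            have hne3 : ¬(-m = l) := fun h => hml2 (by omega)
            have hlk : pvLk (d.insert (-l) 2) m = pvLk d m := by
              simp only [pvLk, PySem.Dict.get?_insert, if_neg hne1, if_neg hne2]
            rw [hlk, hv m]
            simp [List.mem_append, hml, hne3]
    · -- first sighting of either sign: dict[l] := 1
      have h2' : d.contains (-l) = false := by simpa using h2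
      have hgnl : d.get? (-l) = none := (PySem.Dict.get?_eq_none_iff_contains d (-l)).mpr h2'
      have hstep : (pvStep1 (s, d) l).2 = d.insert l 1 := by
        simp [pvStep1, h1', h2']
      rw [hstep]
      have hlknone : pvLk d l = none := by simp [pvLk, hgl, hgnl]
      have hnp : ¬(l ∈ p ∨ -l ∈ p) := by
        intro hcon
        have := hv l
        rw [hlknone, if_pos hcon] at this
        exact absurd this (by simp)
      have hlp : l ∉ p := fun h => hnp (Or.inl h)
      have hnlp : -l ∉ p := fun h => hnp (Or.inr h)
      refine ⟨?_, ?_, ?_⟩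
      · intro k hkk
        rw [PySem.Dict.contains_insert] at hkk
        simp only [Bool.or_eq_true, beq_iff_eq] at hkk
        rcases hkk with h | h
        · subst h; exact List.mem_append_right _ (by simp)
        · exact List.mem_append_left _ (hk k h)
      · intro m hm0 hmm
        obtain ⟨hma, hmb⟩ := hmm
        rw [PySem.Dict.contains_insert] at hma hmb
        simp only [beq_iff_eq, Bool.or_eq_true] at hma hmb
        rcases hma with hma | hma <;> rcases hmb with hmb | hmb
        · omega
        · have : m = l := hma
          subst this
          rw [hmb] at h2'
          simp at h2'
        · have : m = -l := by omega
          subst this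
          rw [hma] at h2'
          simp at h2'
        · exact hc m hm0 ⟨hma, hmb⟩
      · intro m
        by_cases hml : m = l
        · subst hml
          have hcond2 : ¬(m ≠ 0 ∧ m ∈ p ++ [m] ∧ -m ∈ p ++ [m]) := by
            rintro ⟨hm0, -, h3⟩
            rcases List.mem_append.mp h3 with h3 | h3
            · exact hnlp h3
            · have : -m = m := by simpa using h3
              omega
          have hlkm : pvLk (d.insert m 1) m = some 1 := by
            simp [pvLk]
          rw [hlkm, if_pos (Or.inl (List.mem_append_right _ (by simp))), if_neg hcond2]
        · by_cases hml2 : m = -l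
          · subst hml2
            have hl0 : l ≠ 0 := by
              rintro rfl
              simp at hml
            have hne : -l ≠ l := by omega
            have hcond2 : ¬((-l : Int) ≠ 0 ∧ -l ∈ p ++ [l] ∧ l ∈ p ++ [l]) := by
              rintro ⟨h0, h3, -⟩
              rcases List.mem_append.mp h3 with h3 | h3
              · exact hnlp h3
              · have : -l = l := by simpa using h3
                omega
            simp only [pvLk, PySem.Dict.get?_insert, if_neg hne, hgnl, neg_neg]
            rw [if_pos (Or.inr (List.mem_append_right _ (by simp))), if_neg hcond2]
            simp
          · have hne1 : m ≠ l := hml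
            have hne2 : ¬(-m = l) := fun h => hml2 (by omega)
            have hlk : pvLk (d.insert l 1) m = pvLk d m := by
              simp only [pvLk, PySem.Dict.get?_insert, if_neg hne1, if_neg hne2]
            rw [hlk, hv m]
            simp [List.mem_append, hml, hne2]

lemma pvJ_fold : ∀ (rest p s : List Int) (d : PySem.Dict Int Int),
    pvJ p d → pvJ (p ++ rest) ((rest.foldl pvStep1 (s, d)).2) := by
  intro rest
  induction rest with
  | nil => intro p s d h; simpa using h
  | cons l rest ih =>
    intro p s d h
    have h1 : pvJ (p ++ [l]) (pvStep1 (s, d) l).2 := pvJ_step p d s l h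
    have h2 := ih (p ++ [l]) (pvStep1 (s, d) l).1 (pvStep1 (s, d) l).2 h1
    simpa [List.append_assoc] using h2

lemma pvInv_init (ary : List Int) (d : PySem.Dict Int Int) (hJ : pvJ ary d) :
    pvInv ary d PySem.Set.empty := by
  obtain ⟨hk, hc, hv⟩ := hJ
  refine ⟨hc, ?_, ?_⟩
  · intro l hl
    rw [hv l, if_pos (Or.inl hl)]
    simp
  · intro l hl
    rw [hv l, if_pos (Or.inl hl)]
    constructor
    · intro h
      have hcond : l ≠ 0 ∧ l ∈ ary ∧ -l ∈ ary := by
        by_contra hcon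
        rw [if_neg hcon] at h
        simp at h
      exact ⟨hcond.1, hcond.2.2, by simp [PySem.Set.empty]⟩
    · rintro ⟨h0, hneg, -⟩
      rw [if_pos ⟨h0, hl, hneg⟩]

-- the canonical loop condition, as the Prop the invariant speaks about
lemma pvCondB (ary : List Int) (em : PySem.Set Int) (x : Int) :
    ((((x != 0) && (PySem.Set.ofList ary).contains (-x)) && !(em.contains |x|)) = true) ↔
      (x ≠ 0 ∧ -x ∈ ary ∧ |x| ∉ em) := by
  constructor
  · intro h
    simp only [Bool.and_eq_true, bne_iff_ne, Bool.not_eq_true'] at h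
    obtain ⟨⟨h1, h2⟩, h3⟩ := h
    refine ⟨h1, (PySem.Set.mem_ofList ary (-x)).mp ((PySem.Set.contains_iff _ _).mp h2), fun hm => ?_⟩
    rw [(PySem.Set.contains_iff em _).mpr hm] at h3
    cases h3
  · rintro ⟨h1, h2, h3⟩
    simp only [Bool.and_eq_true, bne_iff_ne, Bool.not_eq_true']
    refine ⟨⟨h1, (PySem.Set.contains_iff _ _).mpr ((PySem.Set.mem_ofList ary (-x)).mpr h2)⟩, ?_⟩
    rcases h : em.contains |x| with _ | _
    · rfl
    · exact absurd ((PySem.Set.contains_iff em _).mp h) h3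

-- the invariant survives one emission: A writes 0 at the key holding the 2, the canonical pass records |l|
lemma pvInv_emit (ary : List Int) (d : PySem.Dict Int Int) (em : PySem.Set Int) (l k : Int)
    (hInv : pvInv ary d em) (hl0 : l ≠ 0) (hkk : k = l ∨ k = -l) (hck : d.contains k = true) :
    pvInv ary (d.insert k 0) (PySem.Set.add em |l|) := by
  obtain ⟨hc, ha, hb⟩ := hInv
  have hk0 : k ≠ 0 := by rcases hkk with rfl | rfl <;> omega
  have hcnk : d.contains (-k) = false := by
    have := hc k hk0
    rcases h : d.contains (-k) with _ | _
    · rfl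
    · exact absurd ⟨hck, h⟩ this
  have hgnk : d.get? (-k) = none := (PySem.Dict.get?_eq_none_iff_contains d (-k)).mpr hcnk
  have hcontains : ∀ x : Int, ((d.insert k 0).contains x = true ↔ d.contains x = true) := by
    intro x
    rw [PySem.Dict.contains_insert]
    simp only [Bool.or_eq_true, beq_iff_eq]
    exact ⟨fun h => h.elim (fun h => h ▸ hck) id, Or.inr⟩
  have hlk' : ∀ m : Int, m ≠ k → -m ≠ k → pvLk (d.insert k 0) m = pvLk d m := by
    intro m h1 h2
    simp only [pvLk, PySem.Dict.get?_insert, if_neg h1, if_neg h2]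
  have hlkk : pvLk (d.insert k 0) k = some 0 := by
    simp [pvLk]
  have hlknk : pvLk (d.insert k 0) (-k) = some 0 := by
    have hne : -k ≠ k := by omega
    simp only [pvLk, PySem.Dict.get?_insert, if_neg hne, hgnk, neg_neg]
    simp
  refine ⟨?_, ?_, ?_⟩
  · intro m hm0 hmm
    exact hc m hm0 ⟨(hcontains m).mp hmm.1, (hcontains (-m)).mp hmm.2⟩
  · intro m hm
    by_cases h1 : m = k
    · rw [h1, hlkk]; simp
    · by_cases h2 : m = -k
      · rw [h2, hlknk]; simp
      · rw [hlk' m h1 (fun h => h2 (by omega))]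
        exact ha m hm
  · intro m hm
    by_cases h1 : m = k
    · subst h1
      rw [hlkk]
      have habs : |m| = |l| := by rcases hkk with rfl | rfl <;> simp [abs_neg]
      constructor
      · intro h; simp at h
      · rintro ⟨-, -, h3⟩
        exact absurd ((PySem.Set.mem_add em |l| |m|).mpr (Or.inr habs)) h3
    · by_cases h2 : m = -k
      · subst h2
        rw [hlknk]
        have habs : |(-k : Int)| = |l| := by rcases hkk with rfl | rfl <;> simp [abs_neg]
        constructor
        · intro h; simp at h
        · rintro ⟨-, -, h3⟩
          exact absurd ((PySem.Set.mem_add em |l| _).mpr (Or.inr habs)) h3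
      · rw [hlk' m h1 (fun h => h2 (by omega)), hb m hm]
        have habs : |m| ≠ |l| := by
          rcases hkk with rfl | rfl <;>
            (intro h; rcases abs_eq_abs.mp h with h | h <;> omega)
        simp [PySem.Set.mem_add, habs]

lemma pvLoops_eq (ary : List Int) : ∀ (rest acc : List Int) (d : PySem.Dict Int Int) (em : PySem.Set Int),
    (∀ l ∈ rest, l ∈ ary) → pvInv ary d em →
    (rest.foldl pvStep2 (acc, d)).1 = (rest.foldl (pvCStep (PySem.Set.ofList ary)) (acc, em)).1 := by
  intro rest
  induction rest with
  | nil => intros; rfl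
  | cons l rest ih =>
    intro acc d em hsub hInv
    have hl : l ∈ ary := hsub l (by simp)
    have hsub' : ∀ x ∈ rest, x ∈ ary := fun x hx => hsub x (List.mem_cons_of_mem l hx)
    obtain ⟨hc, ha, hb⟩ := hInv
    rw [List.foldl_cons, List.foldl_cons]
    have habs : (if l < 0 then acc ++ [l] ++ [(-1) * l] else acc ++ [(-1) * l] ++ [l]) =
        acc ++ [-|l|] ++ [|l|] := by
      by_cases hlt : l < 0
      · rw [if_pos hlt, abs_of_neg hlt]
        simp
      · rw [if_neg hlt, abs_of_nonneg (by omega)]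
        simp
    have habs' : (if l < 0 then acc ++ [l] ++ [-l] else acc ++ [-l] ++ [l]) =
        acc ++ [-|l|] ++ [|l|] := by
      rw [← habs]
      by_cases hlt : l < 0
      · rw [if_pos hlt, if_pos hlt, neg_one_mul]
      · rw [if_neg hlt, if_neg hlt, neg_one_mul]
    cases hg : d.get? l with
    | some v =>
      have hcl : d.contains l = true := by
        rcases h : d.contains l with _ | _
        · rw [(PySem.Dict.get?_eq_none_iff_contains d l).mpr h] at hg
          cases hg
        · rfl
      have hlkl : pvLk d l = some v := by simp [pvLk, hg]
      by_cases hv2 : v = 2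
      · subst hv2
        obtain ⟨hl0, hneg, hem⟩ := (hb l hl).mp hlkl
        have hstepA : pvStep2 (acc, d) l = (acc ++ [-|l|] ++ [|l|], d.insert l 0) := by
          simp only [pvStep2, hcl, Bool.true_or, if_true, hg]
          rw [if_pos (by decide)]
          rw [habs]
        have hstepB : pvCStep (PySem.Set.ofList ary) (acc, em) l = (acc ++ [-|l|] ++ [|l|], em.add |l|) := by
          simp only [pvCStep]
          rw [if_pos ((pvCondB ary em l).mpr ⟨hl0, hneg, hem⟩)]
        rw [hstepA, hstepB]
        exact ih _ _ _ hsub' (pvInv_emit ary d em l l ⟨hc, ha, hb⟩ hl0 (Or.inl rfl) hcl)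
      · have hstepA : pvStep2 (acc, d) l = (acc, d) := by
          simp only [pvStep2, hcl, Bool.true_or, if_true, hg]
          rw [if_neg (by simpa using hv2)]
        have hncond : ¬(l ≠ 0 ∧ -l ∈ ary ∧ |l| ∉ em) := by
          intro h
          exact hv2 (by have := (hb l hl).mpr h; rw [hlkl] at this; exact Option.some.inj this)
        have hstepB : pvCStep (PySem.Set.ofList ary) (acc, em) l = (acc, em) := by
          simp only [pvCStep]
          rw [if_neg (fun h => hncond ((pvCondB ary em l).mp h))]
        rw [hstepA, hstepB]
        exact ih _ _ _ hsub' ⟨hc, ha, hb⟩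
    | none =>
      have hcl : d.contains l = false := (PySem.Dict.get?_eq_none_iff_contains d l).mp hg
      cases hg2 : d.get? (-l) with
      | none =>
        exact absurd (by simp [pvLk, hg, hg2]) (ha l hl)
      | some v =>
        have hcnl : d.contains (-l) = true := by
          rcases h : d.contains (-l) with _ | _
          · rw [(PySem.Dict.get?_eq_none_iff_contains d (-l)).mpr h] at hg2
            cases hg2
          · rfl
        have hlkl : pvLk d l = some v := by simp [pvLk, hg, hg2]
        have hguard : (d.contains l || d.contains (-l)) = true := by
          rw [hcnl, Bool.or_true]
        by_cases hv2 : v = 2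
        · subst hv2
          obtain ⟨hl0, hneg, hem⟩ := (hb l hl).mp hlkl
          have hstepA : pvStep2 (acc, d) l = (acc ++ [-|l|] ++ [|l|], d.insert (-l) 0) := by
            simp only [pvStep2, neg_one_mul, hg, hg2, hguard, if_true]
            rw [if_pos (by decide), habs']
          have hstepB : pvCStep (PySem.Set.ofList ary) (acc, em) l = (acc ++ [-|l|] ++ [|l|], em.add |l|) := by
            simp only [pvCStep]
            rw [if_pos ((pvCondB ary em l).mpr ⟨hl0, hneg, hem⟩)]
          rw [hstepA, hstepB]
          exact ih _ _ _ hsub' (pvInv_emit ary d em l (-l) ⟨hc, ha, hb⟩ hl0 (Or.inr rfl) hcnl)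
        · have hstepA : pvStep2 (acc, d) l = (acc, d) := by
            simp only [pvStep2, neg_one_mul, hg, hg2, hguard, if_true]
            rw [if_neg (by simpa using hv2)]
          have hncond : ¬(l ≠ 0 ∧ -l ∈ ary ∧ |l| ∉ em) := by
            intro h
            exact hv2 (by have := (hb l hl).mpr h; rw [hlkl] at this; exact Option.some.inj this)
          have hstepB : pvCStep (PySem.Set.ofList ary) (acc, em) l = (acc, em) := by
            simp only [pvCStep]
            rw [if_neg (fun h => hncond ((pvCondB ary em l).mp h))]
          rw [hstepA, hstepB]
          exact ih _ _ _ hsub' ⟨hc, ha, hb⟩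

-- the emission sequence of the canonical pass, values only
def pvE (ary : List Int) : List Int → PySem.Set Int → List Int
  | [], _ => []
  | x :: r, em =>
    if x ≠ 0 ∧ -x ∈ ary ∧ |x| ∉ em then |x| :: pvE ary r (PySem.Set.add em |x|)
    else pvE ary r em

-- the canonical fold's output is the emission sequence flattened into (-v, v) pairs
lemma pvFoldC_eq_E (ary : List Int) : ∀ (rest acc : List Int) (em : PySem.Set Int),
    (rest.foldl (pvCStep (PySem.Set.ofList ary)) (acc, em)).1 =
      acc ++ (pvE ary rest em).flatMap (fun v => [-v, v]) := by
  intro rest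
  induction rest with
  | nil => intro acc em; simp [pvE]
  | cons x r ih =>
    intro acc em
    rw [List.foldl_cons]
    by_cases h : x ≠ 0 ∧ -x ∈ ary ∧ |x| ∉ em
    · have hstep : pvCStep (PySem.Set.ofList ary) (acc, em) x = (acc ++ [-|x|] ++ [|x|], em.add |x|) := by
        simp only [pvCStep]
        rw [if_pos ((pvCondB ary em x).mpr h)]
      rw [hstep, ih, pvE, if_pos h]
      simp
    · have hstep : pvCStep (PySem.Set.ofList ary) (acc, em) x = (acc, em) := by
        simp only [pvCStep]
        rw [if_neg (fun hb => h ((pvCondB ary em x).mp hb))]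
      rw [hstep, ih, pvE, if_neg h]

lemma pvE_mem (ary : List Int) : ∀ (rest : List Int) (em : PySem.Set Int) (v : Int),
    v ∈ pvE ary rest em ↔ v ∉ em ∧ ∃ x ∈ rest, |x| = v ∧ x ≠ 0 ∧ -x ∈ ary := by
  intro rest
  induction rest with
  | nil => intro em v; simp [pvE]
  | cons x r ih =>
    intro em v
    by_cases h : x ≠ 0 ∧ -x ∈ ary ∧ |x| ∉ em
    · rw [pvE, if_pos h]
      simp only [List.mem_cons, ih, PySem.Set.mem_add]
      constructor
      · rintro (rfl | ⟨hnem, x', hx', hax', h0', hn'⟩)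
        · exact ⟨h.2.2, x, by simp, rfl, h.1, h.2.1⟩
        · exact ⟨fun hm => hnem (Or.inl hm), x', Or.inr hx', hax', h0', hn'⟩
      · rintro ⟨hnem, x', hx', hax', h0', hn'⟩
        by_cases hv : v = |x|
        · exact Or.inl hv
        · rcases hx' with rfl | hx'
          · exact absurd hax'.symm hv
          · exact Or.inr ⟨fun hm => hm.elim hnem hv, x', hx', hax', h0', hn'⟩
    · rw [pvE, if_neg h]
      rw [ih]
      constructor
      · rintro ⟨hnem, x', hx', hax', h0', hn'⟩
        exact ⟨hnem, x', List.mem_cons_of_mem _ hx', hax', h0', hn'⟩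
      · rintro ⟨hnem, x', hx', hax', h0', hn'⟩
        rcases List.mem_cons.mp hx' with rfl | hx'
        · exact absurd ⟨h0', hn', fun hm => hnem (hax' ▸ hm)⟩ h
        · exact ⟨hnem, x', hx', hax', h0', hn'⟩

lemma pvE_nodup (ary : List Int) : ∀ (rest : List Int) (em : PySem.Set Int),
    (pvE ary rest em).Nodup := by
  intro rest
  induction rest with
  | nil => intro em; simp [pvE]
  | cons x r ih =>
    intro em
    by_cases h : x ≠ 0 ∧ -x ∈ ary ∧ |x| ∉ em
    · rw [pvE, if_pos h]
      refine List.nodup_cons.mpr ⟨fun hm => ?_, ih _⟩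
      have := ((pvE_mem ary r (em.add |x|) |x|).mp hm).1
      exact this ((PySem.Set.mem_add em |x| |x|).mpr (Or.inr rfl))
    · rw [pvE, if_neg h]
      exact ih em

-- proof-side first-occurrence key, phrased over list scans
def pvTrig (ary : List Int) (v : Int) : Int :=
  match PySem.List.index? ary v, PySem.List.index? ary (-v) with
  | some i, some j => min (i : Int) (j : Int)
  | some i, none => (i : Int)
  | none, some j => (j : Int)
  | none, none => 0

lemma pvFirst_append (ys : List Int) (x : Int) :
    pvFirst (ys ++ [x]) = (pvFirst ys).setdefault x (ys.length : Int) := by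
  have henum : PySem.List.enumerate (ys ++ [x]) 0 =
      PySem.List.enumerate ys 0 ++ [((ys.length : Int), x)] := by
    rw [PySem.List.enumerate_append]
    simp [PySem.List.enumerate_cons, PySem.List.enumerate_nil]
  unfold pvFirst
  rw [henum, List.foldl_append]
  simp

lemma pvFirst_get? (ary : List Int) (v : Int) :
    (pvFirst ary).get? v = (PySem.List.index? ary v).map (fun n => (n : Int)) := by
  induction ary using List.reverseRecOn with
  | nil =>
    simp [pvFirst, PySem.List.enumerate_nil, PySem.Dict.get?_empty,
      PySem.List.index?_eq_idxOf?]
  | append_singleton ys x ih =>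
    rw [pvFirst_append]
    by_cases hvx : v = x
    · subst hvx
      rw [PySem.Dict.get?_setdefault_self, ih]
      by_cases hmem : v ∈ ys
      · obtain ⟨k, hk⟩ := Option.isSome_iff_exists.mp
          ((PySem.List.index?_isSome_iff ys v).mpr hmem)
        rw [hk, PySem.List.index?_append_of_mem _ hmem, hk]
        simp
      · rw [(PySem.List.index?_eq_none_iff ys v).mpr hmem,
          PySem.List.index?_append_singleton_self ys v hmem]
        simp
    · rw [PySem.Dict.get?_setdefault_of_ne _ _ hvx, ih]
      by_cases hmem : v ∈ ys
      · rw [PySem.List.index?_append_of_mem _ hmem]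
      · rw [(PySem.List.index?_eq_none_iff ys v).mpr hmem,
          (PySem.List.index?_eq_none_iff _ v).mpr (by simp [hmem, hvx])]

lemma pvFirst_contains (ary : List Int) (v : Int) :
    (pvFirst ary).contains v = true ↔ v ∈ ary := by
  rw [PySem.Dict.contains_eq_isSome_get?, pvFirst_get?]
  cases h : PySem.List.index? ary v with
  | none => simpa using (PySem.List.index?_eq_none_iff ary v).mp h
  | some k =>
    have hm : v ∈ ary := (PySem.List.index?_isSome_iff ary v).mp (by rw [h]; rfl)
    simpa using hm

lemma pvFirst_mem_keys (ary : List Int) (v : Int) :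
    v ∈ (pvFirst ary).keys ↔ v ∈ ary := by
  rw [← PySem.Dict.contains_iff_mem_keys]
  exact pvFirst_contains ary v

lemma pvFirst_keys_nodup (ary : List Int) : (pvFirst ary).keys.Nodup := by
  induction ary using List.reverseRecOn with
  | nil => simp [pvFirst, PySem.List.enumerate_nil, PySem.Dict.keys_empty]
  | append_singleton ys x ih =>
    rw [pvFirst_append, PySem.Dict.keys_setdefault]
    split
    · exact ih
    · rename_i hc
      refine List.Nodup.append ih (List.nodup_singleton x) ?_
      intro a ha hb
      have hax : a = x := by simpa using hb
      subst hax
      exact hc (PySem.Dict.contains_iff_mem_keys _ _ |>.mpr ha)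

lemma pvKey_eq (ary : List Int) (v : Int) :
    pvKey (pvFirst ary) v = pvTrig ary v := by
  unfold pvKey pvTrig
  rw [pvFirst_get?, pvFirst_get?]
  cases hx : PySem.List.index? ary v <;> cases hy : PySem.List.index? ary (-v) <;> simp

-- first-occurrence key of an emitted value: at an emission point it equals the prefix length
lemma pvTrig_emit (p r : List Int) (x : Int) (_hx0 : x ≠ 0) (hneg : -x ∈ p ++ x :: r)
    (hp : ∀ y ∈ p, |y| ≠ |x|) : pvTrig (p ++ x :: r) |x| = (p.length : Int) := by
  have hxp : x ∉ p := fun hm => hp x hm rfl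
  have hnxp : -x ∉ p := fun hm => hp (-x) hm (abs_neg x)
  have hix : PySem.List.index? (p ++ x :: r) x = some p.length :=
    (PySem.List.index?_eq_some_iff _ _ _).mpr ⟨p, r, rfl, rfl, hxp⟩
  obtain ⟨m, him⟩ : ∃ m, PySem.List.index? (p ++ x :: r) (-x) = some m := by
    rcases ho : PySem.List.index? (p ++ x :: r) (-x) with _ | m
    · exact absurd hneg ((PySem.List.index?_eq_none_iff _ _).mp ho)
    · exact ⟨m, rfl⟩
  obtain ⟨hk, hgm, -⟩ := PySem.List.getElem_of_index?_eq_some him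
  have hm_ge : p.length ≤ m := by
    by_contra hlt
    have he1 : (p ++ x :: r)[m]'hk = p[m]'(by omega) := List.getElem_append_left (by omega)
    have : -x ∈ p := by
      have h2 : p[m]'(by omega) = -x := he1.symm.trans hgm
      exact h2 ▸ List.getElem_mem _
    exact hnxp this
  rcases le_or_gt 0 x with hx | hx
  · have habs : |x| = x := abs_of_nonneg hx
    unfold pvTrig
    rw [habs, hix, him]
    simp only [min_def]
    split <;> omega
  · have habs : |x| = -x := abs_of_neg hx
    unfold pvTrig
    rw [habs, neg_neg, him, hix]
    simp only [min_def]
    split <;> omega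

lemma pvE_pairwise (ary : List Int) : ∀ (rest p : List Int) (em : PySem.Set Int),
    ary = p ++ rest →
    (∀ v : Int, v ∈ em ↔ ∃ y ∈ p, y ≠ 0 ∧ -y ∈ ary ∧ |y| = v) →
    (pvE ary rest em).Pairwise (fun u w => pvTrig ary u < pvTrig ary w) ∧
      (∀ v ∈ pvE ary rest em, (p.length : Int) ≤ pvTrig ary v) := by
  intro rest
  induction rest with
  | nil => intro p em _ _; simp [pvE]
  | cons x r ih =>
    intro p em hsplit hem
    by_cases h : x ≠ 0 ∧ -x ∈ ary ∧ |x| ∉ em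
    · obtain ⟨hx0, hnx, hxe⟩ := h
      have hp : ∀ y ∈ p, |y| ≠ |x| := by
        intro y hy habs
        apply hxe
        have hy0 : y ≠ 0 := by
          intro h0
          rw [h0] at habs
          simp only [abs_zero] at habs
          have : |x| > 0 := abs_pos.mpr hx0
          omega
        have hny : -y ∈ ary := by
          rcases abs_eq_abs.mp habs with rfl | h1
          · exact hnx
          · rw [h1, neg_neg, hsplit]
            exact List.mem_append_right _ (by simp)
        exact (hem |x|).mpr ⟨y, hy, hy0, hny, habs⟩
      have htr : pvTrig ary |x| = (p.length : Int) := by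
        rw [hsplit]
        exact pvTrig_emit p r x hx0 (hsplit ▸ hnx) hp
      have hem' : ∀ v : Int, v ∈ em.add |x| ↔ ∃ y ∈ p ++ [x], y ≠ 0 ∧ -y ∈ ary ∧ |y| = v := by
        intro v
        rw [PySem.Set.mem_add, hem]
        constructor
        · rintro (⟨y, hy, hprops⟩ | rfl)
          · exact ⟨y, List.mem_append_left _ hy, hprops⟩
          · exact ⟨x, List.mem_append_right _ (by simp), hx0, hnx, rfl⟩
        · rintro ⟨y, hy, hy0, hny, habs⟩
          rcases List.mem_append.mp hy with hy | hy
          · exact Or.inl ⟨y, hy, hy0, hny, habs⟩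
          · have : y = x := by simpa using hy
            subst this
            exact Or.inr habs.symm
      have hsplit' : ary = (p ++ [x]) ++ r := by rw [hsplit]; simp
      obtain ⟨htail_pw, htail_ge⟩ := ih (p ++ [x]) (em.add |x|) hsplit' hem'
      rw [pvE, if_pos ⟨hx0, hnx, hxe⟩]
      constructor
      · refine List.pairwise_cons.mpr ⟨fun w hw => ?_, htail_pw⟩
        have hge := htail_ge w hw
        rw [htr]
        simp only [List.length_append, List.length_cons, List.length_nil] at hge
        push_cast at hge
        omega
      · intro v hv
        rcases List.mem_cons.mp hv with rfl | hv
        · rw [htr]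
        · have hge := htail_ge v hv
          simp only [List.length_append, List.length_cons, List.length_nil] at hge
          push_cast at hge ⊢
          omega
    · have hem' : ∀ v : Int, v ∈ em ↔ ∃ y ∈ p ++ [x], y ≠ 0 ∧ -y ∈ ary ∧ |y| = v := by
        intro v
        constructor
        · intro hv
          obtain ⟨y, hy, hprops⟩ := (hem v).mp hv
          exact ⟨y, List.mem_append_left _ hy, hprops⟩
        · rintro ⟨y, hy, hy0, hny, habs⟩
          rcases List.mem_append.mp hy with hy | hy
          · exact (hem v).mpr ⟨y, hy, hy0, hny, habs⟩
          · have : y = x := by simpa using hy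
            subst this
            have hxe : |y| ∈ em := by
              by_contra hxe
              exact h ⟨hy0, hny, hxe⟩
            exact habs ▸ hxe
      have hsplit' : ary = (p ++ [x]) ++ r := by rw [hsplit]; simp
      obtain ⟨hpw, hge⟩ := ih (p ++ [x]) em hsplit' hem'
      rw [pvE, if_neg h]
      refine ⟨hpw, fun v hv => ?_⟩
      have hg := hge v hv
      simp only [List.length_append, List.length_cons, List.length_nil] at hg
      push_cast at hg ⊢
      omega

-- the emission sequence is exactly B's sorted matched list
lemma pvSorted_eq_E (ary : List Int) :
    PySem.List.sorted
      ((pvFirst ary).keys.filter (fun v => decide (0 < v) && (pvFirst ary).contains (-v)))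
      (pvKey (pvFirst ary)) false = pvE ary ary PySem.Set.empty := by
  have hmem : ∀ v : Int, v ∈ pvE ary ary PySem.Set.empty ↔
      v ∈ (pvFirst ary).keys.filter (fun v => decide (0 < v) && (pvFirst ary).contains (-v)) := by
    intro v
    rw [pvE_mem, List.mem_filter]
    simp only [Bool.and_eq_true, decide_eq_true_eq, pvFirst_mem_keys, pvFirst_contains]
    constructor
    · rintro ⟨-, x, hx, rfl, hx0, hnx⟩
      rcases le_or_gt 0 x with hs | hs
      · rw [abs_of_nonneg hs]
        exact ⟨hx, by omega, hnx⟩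
      · rw [abs_of_neg hs]
        exact ⟨hnx, by omega, by rw [neg_neg]; exact hx⟩
    · rintro ⟨hv, hv0, hnv⟩
      exact ⟨by simp [PySem.Set.empty], v, hv, abs_of_pos hv0, by omega, hnv⟩
  have hnd1 : (pvE ary ary PySem.Set.empty).Nodup := pvE_nodup ary ary PySem.Set.empty
  have hnd2 : ((pvFirst ary).keys.filter
      (fun v => decide (0 < v) && (pvFirst ary).contains (-v))).Nodup :=
    (pvFirst_keys_nodup ary).filter _
  have hperm : (pvE ary ary PySem.Set.empty).Perm
      ((pvFirst ary).keys.filter (fun v => decide (0 < v) && (pvFirst ary).contains (-v))) :=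
    (List.perm_ext_iff_of_nodup hnd1 hnd2).mpr hmem
  have hpw0 : (pvE ary ary PySem.Set.empty).Pairwise (fun u w => pvTrig ary u < pvTrig ary w) :=
    (pvE_pairwise ary ary [] PySem.Set.empty (by simp) (by simp [PySem.Set.empty])).1
  have hpw : (pvE ary ary PySem.Set.empty).Pairwise
      (fun u w => pvKey (pvFirst ary) u < pvKey (pvFirst ary) w) :=
    hpw0.imp (fun {a b} h => by rw [pvKey_eq, pvKey_eq]; exact h)
  exact PySem.List.sorted_eq_of_perm_of_pairwise_lt _ _ _ hperm hpw

-- ===== VERDICT (by name: the statement is the Claim_ definition above) =====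
theorem PairsPositiveNegativeValuesArray_spec : Claim_equal_PairsPositiveNegativeValuesArray := by
  intro ary _
  unfold Spec_PairsPositiveNegativeValuesArray PairsPositiveNegativeValuesArray PairsPositiveNegativeValuesArray_alt
  have hstk := pvStk_eq ary [] PySem.Dict.empty
  have hJ : pvJ ary ((ary.foldl pvStep1 ([], PySem.Dict.empty)).2) := by
    have h0 : pvJ [] (PySem.Dict.empty : PySem.Dict Int Int) := by
      refine ⟨fun k h => by simp [PySem.Dict.contains_empty] at h,
        fun l _ h => by simp [PySem.Dict.contains_empty] at h,
        fun l => by simp [pvLk, PySem.Dict.get?_empty]⟩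
    simpa using pvJ_fold ary [] [] PySem.Dict.empty h0
  have hInv := pvInv_init ary _ hJ
  simp only [hstk, List.nil_append]
  rw [pvLoops_eq ary ary [] _ PySem.Set.empty (fun l h => h) hInv]
  rw [pvFoldC_eq_E ary ary [] PySem.Set.empty]
  rw [PySem.List.foldl_append_eq_flatMap (g := fun v => [-v, v])]
  rw [pvSorted_eq_E ary]
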